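-- pv_equiv track=rewrite | github.com/subeom7/baekjoon | codetree/고대 문명 유적 탐사.py | check_relic
-- ===== SOURCE A (Python) =====
-- from collections import deque
--
-- directions = [(1, 0), (0, 1), (-1, 0), (0, -1)]
--
-- def check_relic(new_matrix):
--     visited = [[False] * 5 for _ in range(5)]
--     res = 0
--
--     for i in range(5):
--         for j in range(5):
--             if not visited[i][j]:
--                 count = 0
--                 q = deque()
--                 q.append((i, j))
--                 visited[i][j] = True
--                 cur_num = new_matrix[i][j]
--
--                 while q:
--                     count += 1
--                     r, c = q.popleft()
--                     for dr, dc in directions: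
--                         nr, nc = r + dr, dc + c
--                         if 0 <= nr < 5 and 0 <= nc < 5 and not visited[nr][nc] and new_matrix[nr][nc] == cur_num:
--                             visited[nr][nc] = True
--                             q.append((nr, nc))
--
--                 res += count if count >= 3 else 0
--     return res
-- ===== SOURCE B (Python) =====
-- from collections import Counter
--
--
-- def check_relic(new_matrix):
--     # Connected-component labeling: collect the equal-value adjacency edges,
--     # merge labels across each edge, then sum the sizes of components >= 3.
--     edges = [(5 * i + j, 5 * i + j + 1)
--              for i in range(5) for j in range(4)
--              if new_matrix[i][j] == new_matrix[i][j + 1]]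
--     edges += [(5 * i + j, 5 * i + j + 5)
--               for i in range(4) for j in range(5)
--               if new_matrix[i][j] == new_matrix[i + 1][j]]
--
--     labels = list(range(25))
--     for a, b in edges:
--         la, lb = labels[a], labels[b]
--         if la != lb:
--             labels = [lb if l == la else l for l in labels]
--
--     return sum(n for n in Counter(labels).values() if n >= 3)
-- ===== Notes on version B (the rewrite author's own statement) =====
-- stated objective: alternative
-- what changed: Replaces the shared-visited BFS flood fill (summing each flooded component's size when >= 3) by connected-component labeling: build the list of equal-value right/down adjacency edges, merge labels across each edge union-find style, and sum the Counter multiplicities that are >= 3; Pre_ only excludes inputs where A raises IndexError (fewer than 5 rows or a short row among the first 5).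
import Mathlib
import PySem

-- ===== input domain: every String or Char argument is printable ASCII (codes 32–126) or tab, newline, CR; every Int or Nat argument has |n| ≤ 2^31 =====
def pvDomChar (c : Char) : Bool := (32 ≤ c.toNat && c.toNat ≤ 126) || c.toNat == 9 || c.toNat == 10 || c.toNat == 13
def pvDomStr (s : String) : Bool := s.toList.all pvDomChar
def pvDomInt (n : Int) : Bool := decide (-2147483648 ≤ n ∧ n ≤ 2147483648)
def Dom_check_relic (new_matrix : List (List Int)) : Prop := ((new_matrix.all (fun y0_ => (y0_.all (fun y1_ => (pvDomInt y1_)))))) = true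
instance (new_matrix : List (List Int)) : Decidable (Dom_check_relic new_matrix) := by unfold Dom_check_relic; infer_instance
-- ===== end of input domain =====

set_option maxHeartbeats 1000000


-- B replaces the shared-visited BFS flood fill by connected-component labeling:
-- collect the equal-value adjacency edges, merge labels across each edge, and
-- sum the Counter values that are >= 3 (alternative decomposition, same cost).

-- shared indexing helper: new_matrix[r][c] (always used in range under Pre_)
def pvVal (m : List (List Int)) (r c : Int) : Int :=
  PySem.List.pyGetD (PySem.List.pyGetD m r []) c 0

-- ===== PORT A =====
def pvDirections : List (Int × Int) := [(1, 0), (0, 1), (-1, 0), (0, -1)]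

def pvStep (m : List (List Int)) (cur r c : Int)
    (st : List (Int × Int) × List (Int × Int)) (d : Int × Int) :
    List (Int × Int) × List (Int × Int) :=
  let nr := r + d.1
  let nc := d.2 + c
  if 0 ≤ nr ∧ nr < 5 ∧ 0 ≤ nc ∧ nc < 5 ∧ ¬ (nr, nc) ∈ st.1 ∧ pvVal m nr nc = cur
  then (st.1 ++ [(nr, nc)], st.2 ++ [(nr, nc)])
  else st

-- the while loop; each popped cell is visited, so 30 units of fuel never run out
def pvBfs (m : List (List Int)) (cur : Int) :
    Nat → List (Int × Int) → List (Int × Int) → Int → List (Int × Int) × Int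
  | 0, vis, _, cnt => (vis, cnt)
  | fuel + 1, vis, q, cnt =>
    match q with
    | [] => (vis, cnt)
    | (r, c) :: q' =>
      let st := pvDirections.foldl (pvStep m cur r c) (vis, q')
      pvBfs m cur fuel st.1 st.2 (cnt + 1)

def check_relic (new_matrix : List (List Int)) : Int :=
  ((PySem.List.pyRange 0 5 1).foldl (fun st i =>
    (PySem.List.pyRange 0 5 1).foldl (fun (st : List (Int × Int) × Int) j =>
      if (i, j) ∈ st.1 then st
      else
        let r := pvBfs new_matrix (pvVal new_matrix i j) 30 ((i, j) :: st.1) [(i, j)] 0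
        (r.1, st.2 + if 3 ≤ r.2 then r.2 else 0)) st)
    (([] : List (Int × Int)), (0 : Int))).2

-- ===== PORT B =====
def pvEdges (m : List (List Int)) : List (Int × Int) :=
  ((PySem.List.pyRange 0 5 1).flatMap (fun i =>
      ((PySem.List.pyRange 0 4 1).filter (fun j => pvVal m i j == pvVal m i (j + 1))).map
        (fun j => (5 * i + j, 5 * i + j + 1))))
  ++ ((PySem.List.pyRange 0 4 1).flatMap (fun i =>
      ((PySem.List.pyRange 0 5 1).filter (fun j => pvVal m i j == pvVal m (i + 1) j)).map
        (fun j => (5 * i + j, 5 * i + j + 5))))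

def pvMerge (labels : List Int) (e : Int × Int) : List Int :=
  let la := PySem.List.pyGetD labels e.1 0
  let lb := PySem.List.pyGetD labels e.2 0
  if la ≠ lb then labels.map (fun l => if l = la then lb else l) else labels

def check_relic_alt (new_matrix : List (List Int)) : Int :=
  let labels := (pvEdges new_matrix).foldl pvMerge (PySem.List.pyRange 0 25 1)
  (((PySem.Dict.counter labels).values).filter (fun n => decide (3 ≤ n))).sum

-- ===== PRECONDITION & SPEC =====
-- A reads new_matrix[i][j] for every 0 ≤ i,j < 5, so it returns exactly when the
-- matrix has at least 5 rows whose first 5 each have at least 5 entries.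
def Pre_check_relic (new_matrix : List (List Int)) : Prop :=
  5 ≤ new_matrix.length ∧ ∀ row ∈ new_matrix.take 5, 5 ≤ row.length
instance (new_matrix : List (List Int)) : Decidable (Pre_check_relic new_matrix) := by
  unfold Pre_check_relic; infer_instance

def pvWitness_check_relic : List (List Int) :=
  [[0, 0, 0, 1, 1], [2, 0, 1, 1, 2], [2, 2, 1, 3, 3], [4, 2, 2, 3, 4], [4, 4, 4, 3, 4]]

def Spec_check_relic (new_matrix : List (List Int)) (out : Int) : Prop := out = check_relic_alt new_matrix
instance (new_matrix : List (List Int)) (out : Int) : Decidable (Spec_check_relic new_matrix out) := by unfold Spec_check_relic; infer_instance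

-- ===== CLAIM (what is proved, stated in full; the proofs are below) =====
def Claim_equal_check_relic : Prop := ∀ (new_matrix : List (List Int)), Dom_check_relic new_matrix → Pre_check_relic new_matrix → Spec_check_relic new_matrix (check_relic new_matrix)

-- ===== LEMMAS AND PROOFS =====

-- proof-layer notions: in-range cells, grid adjacency, reachability
def pvInR (p : Int × Int) : Prop := 0 ≤ p.1 ∧ p.1 < 5 ∧ 0 ≤ p.2 ∧ p.2 < 5

def pvNbrs (p : Int × Int) : List (Int × Int) :=
  [(p.1 - 1, p.2), (p.1 + 1, p.2), (p.1, p.2 - 1), (p.1, p.2 + 1)]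

def pvAdj (m : List (List Int)) (p q : Int × Int) : Prop :=
  pvInR p ∧ pvInR q ∧ q ∈ pvNbrs p ∧ pvVal m p.1 p.2 = pvVal m q.1 q.2

def pvReach (m : List (List Int)) : Int × Int → Int × Int → Prop :=
  Relation.ReflTransGen (pvAdj m)

def pvCells : List (Int × Int) :=
  (PySem.List.pyRange 0 5 1).flatMap (fun i => (PySem.List.pyRange 0 5 1).map (fun j => (i, j)))

def pvGrow (m : List (List Int)) (g : List (Int × Int)) : List (Int × Int) :=
  pvCells.filter (fun p =>
    g.contains p ||
    (pvNbrs p).any (fun n => g.contains n && (pvVal m p.1 p.2 == pvVal m n.1 n.2)))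

def pvIter (m : List (List Int)) (s : Int × Int) (k : Nat) : List (Int × Int) :=
  (List.range k).foldl (fun g _ => pvGrow m g) [s]

def pvComponent (m : List (List Int)) (s : Int × Int) : List (Int × Int) :=
  pvIter m s 25

def pvReachN (m : List (List Int)) : Nat → (Int × Int) → (Int × Int) → Prop
  | 0, s, t => t = s
  | k + 1, s, t => pvReachN m k s t ∨ ∃ u, pvReachN m k s u ∧ pvAdj m u t

def pvF (m : List (List Int)) (t : Int × Int) : Int :=
  if 3 ≤ (pvComponent m t).length then 1 else 0

def pvRel (m : List (List Int)) (cur : Int) (B : List (Int × Int)) (x t : Int × Int) : Prop :=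
  t ∈ pvNbrs x ∧ pvInR t ∧ pvVal m t.1 t.2 = cur ∧ t ∉ B

def pvNewD (m : List (List Int)) (cur r c : Int) :
    List (Int × Int) → List (Int × Int) → List (Int × Int)
  | _, [] => []
  | vis, d :: ds =>
    if 0 ≤ r + d.1 ∧ r + d.1 < 5 ∧ 0 ≤ d.2 + c ∧ d.2 + c < 5 ∧
        ¬(r + d.1, d.2 + c) ∈ vis ∧ pvVal m (r + d.1) (d.2 + c) = cur
    then (r + d.1, d.2 + c) :: pvNewD m cur r c (vis ++ [(r + d.1, d.2 + c)]) ds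
    else pvNewD m cur r c vis ds

def pvG (m : List (List Int)) (st : List (Int × Int) × Int) (p : Int × Int) :
    List (Int × Int) × Int :=
  if p ∈ st.1 then st
  else
    let r := pvBfs m (pvVal m p.1 p.2) 30 (p :: st.1) [p] 0
    (r.1, st.2 + if 3 ≤ r.2 then r.2 else 0)

def pvInv (m : List (List Int)) (P : List (Int × Int)) (st : List (Int × Int) × Int) : Prop :=
  st.1.Nodup ∧ (∀ x ∈ st.1, pvInR x) ∧
  (∀ t, t ∈ st.1 ↔ ∃ p ∈ P, pvReach m p t) ∧
  st.2 = ∑ t ∈ st.1.toFinset, pvF m t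

-- basic facts
theorem mem_pvCells {p : Int × Int} : p ∈ pvCells ↔ pvInR p := by
  obtain ⟨a, b⟩ := p
  simp only [pvCells, List.mem_flatMap, List.mem_map, PySem.List.mem_pyRange_one, pvInR]
  constructor
  · rintro ⟨i, hi, j, hj, h⟩
    simp only [Prod.mk.injEq] at h
    obtain ⟨rfl, rfl⟩ := h
    exact ⟨hi.1, hi.2, hj.1, hj.2⟩
  · rintro ⟨h1, h2, h3, h4⟩
    exact ⟨a, ⟨h1, h2⟩, b, ⟨h3, h4⟩, rfl⟩

theorem nodup_pvCells : pvCells.Nodup := by decide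

theorem length_pvCells : pvCells.length = 25 := by decide

theorem length_le_25 {l : List (Int × Int)} (h : l.Nodup) (hin : ∀ x ∈ l, pvInR x) :
    l.length ≤ 25 := by
  have hsub : l.toFinset ⊆ pvCells.toFinset := by
    intro x hx
    rw [List.mem_toFinset] at *
    exact mem_pvCells.2 (hin x hx)
  have hc := Finset.card_le_card hsub
  rw [List.toFinset_card_of_nodup h, List.toFinset_card_of_nodup nodup_pvCells,
    length_pvCells] at hc
  exact hc

theorem mem_pvNbrs_symm {t x : Int × Int} (h : t ∈ pvNbrs x) : x ∈ pvNbrs t := by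
  obtain ⟨a, b⟩ := t; obtain ⟨c, d⟩ := x
  simp only [pvNbrs, List.mem_cons, Prod.mk.injEq,
    List.not_mem_nil, or_false] at h ⊢
  omega

theorem pvAdj_symm {m : List (List Int)} {p q : Int × Int} (h : pvAdj m p q) : pvAdj m q p :=
  ⟨h.2.1, h.1, mem_pvNbrs_symm h.2.2.1, h.2.2.2.symm⟩

theorem reach_inR {m : List (List Int)} {s t : Int × Int} (h : pvReach m s t) (hs : pvInR s) :
    pvInR t := by
  induction h with
  | refl => exact hs
  | tail _ hbc ih => exact hbc.2.1

theorem reach_val {m : List (List Int)} {s t : Int × Int} (h : pvReach m s t) :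
    pvVal m s.1 s.2 = pvVal m t.1 t.2 := by
  induction h with
  | refl => rfl
  | tail _ hbc ih => exact ih.trans hbc.2.2.2

theorem reach_symm {m : List (List Int)} {s t : Int × Int} (h : pvReach m s t) :
    pvReach m t s := by
  induction h with
  | refl => exact .refl
  | tail _ hbc ih => exact Relation.ReflTransGen.head (pvAdj_symm hbc) ih

theorem reachN_mono {m : List (List Int)} {k k' : Nat} {s t : Int × Int} (hk : k ≤ k')
    (h : pvReachN m k s t) : pvReachN m k' s t := by
  induction hk with
  | refl => exact h
  | step _ ih => exact Or.inl ih

theorem reachN_inR {m : List (List Int)} {k : Nat} {s t : Int × Int} (hs : pvInR s)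
    (h : pvReachN m k s t) : pvInR t := by
  induction k generalizing t with
  | zero => cases h; exact hs
  | succ k ih =>
    rcases h with h | ⟨u, _, hadj⟩
    · exact ih h
    · exact hadj.2.1

theorem reachN_reach {m : List (List Int)} {k : Nat} {s t : Int × Int}
    (h : pvReachN m k s t) : pvReach m s t := by
  induction k generalizing t with
  | zero => cases h; exact .refl
  | succ k ih =>
    rcases h with h | ⟨u, hu, hadj⟩
    · exact ih h
    · exact (ih hu).tail hadj

-- saturation characterization of components
theorem mem_pvGrow {m : List (List Int)} {g : List (Int × Int)} {p : Int × Int} :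
    p ∈ pvGrow m g ↔ pvInR p ∧ (p ∈ g ∨ ∃ n ∈ pvNbrs p, n ∈ g ∧
      pvVal m p.1 p.2 = pvVal m n.1 n.2) := by
  simp only [pvGrow, List.mem_filter, Bool.or_eq_true, List.any_eq_true, Bool.and_eq_true,
    List.contains_iff_mem, beq_iff_eq, mem_pvCells]

theorem pvIter_succ (m : List (List Int)) (s : Int × Int) (k : Nat) :
    pvIter m s (k + 1) = pvGrow m (pvIter m s k) := by
  unfold pvIter
  rw [List.range_succ, List.foldl_append]
  rfl

theorem mem_pvIter {m : List (List Int)} {s : Int × Int} (hs : pvInR s) (k : Nat) :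
    ∀ t, t ∈ pvIter m s k ↔ pvReachN m k s t := by
  induction k with
  | zero => intro t; simp [pvIter, pvReachN]
  | succ k ih =>
    intro t
    rw [pvIter_succ, mem_pvGrow]
    constructor
    · rintro ⟨hin, h | ⟨n, hn, hng, hval⟩⟩
      · exact Or.inl ((ih t).1 h)
      · exact Or.inr ⟨n, (ih n).1 hng,
          ⟨reachN_inR hs ((ih n).1 hng), hin, mem_pvNbrs_symm hn, hval.symm⟩⟩
    · rintro (h | ⟨u, hu, hadj⟩)
      · exact ⟨reachN_inR hs h, Or.inl ((ih t).2 h)⟩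
      · exact ⟨hadj.2.1, Or.inr ⟨u, mem_pvNbrs_symm hadj.2.2.1, (ih u).2 hu,
          hadj.2.2.2.symm⟩⟩

theorem reach_reachN25 {m : List (List Int)} {s t : Int × Int} (hs : pvInR s)
    (h : pvReach m s t) : pvReachN m 25 s t := by
  by_cases hstab : ∃ k < 25, ∀ u, pvReachN m (k + 1) s u ↔ pvReachN m k s u
  · obtain ⟨k, hk, hst⟩ := hstab
    have hN : pvReachN m k s t := by
      clear hk
      induction h with
      | refl => exact reachN_mono (Nat.zero_le k) rfl
      | tail _ hbc ih =>
        exact (hst _).1 (Or.inr ⟨_, ih, hbc⟩)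
    exact reachN_mono (by omega) hN
  · exfalso
    push_neg at hstab
    have grow : ∀ k, k < 25 → (pvIter m s k).toFinset ⊂ (pvIter m s (k + 1)).toFinset := by
      intro k hk
      obtain ⟨u, hu⟩ := hstab k hk
      have hmono : (pvIter m s k).toFinset ⊆ (pvIter m s (k + 1)).toFinset := by
        intro x hx
        rw [List.mem_toFinset, mem_pvIter hs] at *
        exact reachN_mono (Nat.le_succ k) hx
      refine Finset.ssubset_iff_of_subset hmono |>.2 ?_
      have h1 : pvReachN m (k + 1) s u ∧ ¬ pvReachN m k s u := by
        rcases hu with h1 | ⟨h2, h3⟩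
        · exact h1
        · exact absurd (reachN_mono (Nat.le_succ k) h3) h2
      exact ⟨u, by rw [List.mem_toFinset, mem_pvIter hs]; exact h1.1,
        by rw [List.mem_toFinset, mem_pvIter hs]; exact h1.2⟩
    have hcard : ∀ k, k ≤ 25 → k + 1 ≤ (pvIter m s k).toFinset.card := by
      intro k
      induction k with
      | zero => intro _; simp [pvIter]
      | succ k ih =>
        intro hk
        have h1 := ih (by omega)
        have h2 := Finset.card_lt_card (grow k (by omega))
        omega
    have hsub : (pvIter m s 25).toFinset ⊆ pvCells.toFinset := by
      intro x hx
      rw [List.mem_toFinset] at *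
      exact mem_pvCells.2 (reachN_inR hs ((mem_pvIter hs 25 x).1 hx))
    have := Finset.card_le_card hsub
    rw [List.toFinset_card_of_nodup nodup_pvCells, length_pvCells] at this
    have := hcard 25 (by omega)
    omega

theorem mem_pvComponent {m : List (List Int)} {s : Int × Int} (hs : pvInR s) :
    ∀ t, t ∈ pvComponent m s ↔ pvReach m s t := by
  intro t
  have : pvComponent m s = pvIter m s 25 := rfl
  rw [this, mem_pvIter hs]
  exact ⟨reachN_reach, reach_reachN25 hs⟩

theorem nodup_pvComponent (m : List (List Int)) (s : Int × Int) :
    (pvComponent m s).Nodup := by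
  have : pvComponent m s = pvGrow m (pvIter m s 24) := pvIter_succ m s 24
  rw [this]
  exact nodup_pvCells.filter _

theorem comp_length_eq {m : List (List Int)} {s t : Int × Int} (hs : pvInR s)
    (hr : pvReach m s t) : (pvComponent m t).length = (pvComponent m s).length := by
  have ht : pvInR t := reach_inR hr hs
  have hset : (pvComponent m t).toFinset = (pvComponent m s).toFinset := by
    ext u
    rw [List.mem_toFinset, List.mem_toFinset, mem_pvComponent hs, mem_pvComponent ht]
    exact ⟨fun h => hr.trans h, fun h => (reach_symm hr).trans h⟩
  rw [← List.toFinset_card_of_nodup (nodup_pvComponent m t),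
    ← List.toFinset_card_of_nodup (nodup_pvComponent m s), hset]

-- A-side: the direction fold produces the block of freshly visited neighbours
theorem foldl_pvStep (m : List (List Int)) (cur r c : Int) :
    ∀ (ds : List (Int × Int)) (vis q : List (Int × Int)),
    ds.foldl (pvStep m cur r c) (vis, q) =
      (vis ++ pvNewD m cur r c vis ds, q ++ pvNewD m cur r c vis ds) := by
  intro ds
  induction ds with
  | nil => intro vis q; simp [pvNewD]
  | cons d ds ih =>
    intro vis q
    by_cases h : 0 ≤ r + d.1 ∧ r + d.1 < 5 ∧ 0 ≤ d.2 + c ∧ d.2 + c < 5 ∧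
        ¬(r + d.1, d.2 + c) ∈ vis ∧ pvVal m (r + d.1) (d.2 + c) = cur
    · simp only [List.foldl_cons, pvStep, pvNewD, if_pos h, ih]
      simp
    · simp only [List.foldl_cons, pvStep, pvNewD, if_neg h, ih]

theorem pvNewD_sub (m : List (List Int)) (cur r c : Int) :
    ∀ (ds vis : List (Int × Int)) (t : Int × Int), t ∈ pvNewD m cur r c vis ds →
      (∃ d ∈ ds, t = (r + d.1, d.2 + c)) ∧ pvInR t ∧ t ∉ vis ∧ pvVal m t.1 t.2 = cur := by
  intro ds
  induction ds with
  | nil => intro vis t h; simp [pvNewD] at h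
  | cons d ds ih =>
    intro vis t h
    by_cases hc : 0 ≤ r + d.1 ∧ r + d.1 < 5 ∧ 0 ≤ d.2 + c ∧ d.2 + c < 5 ∧
        ¬(r + d.1, d.2 + c) ∈ vis ∧ pvVal m (r + d.1) (d.2 + c) = cur
    · simp only [pvNewD, if_pos hc, List.mem_cons] at h
      rcases h with h | h
      · subst h
        exact ⟨⟨d, List.mem_cons_self .., rfl⟩, ⟨hc.1, hc.2.1, hc.2.2.1, hc.2.2.2.1⟩,
          hc.2.2.2.2.1, hc.2.2.2.2.2⟩
      · obtain ⟨⟨d', hd', ht⟩, hin, hnv, hval⟩ := ih _ t h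
        exact ⟨⟨d', List.mem_cons_of_mem _ hd', ht⟩, hin,
          fun hv => hnv (List.mem_append_left _ hv), hval⟩
    · simp only [pvNewD, if_neg hc] at h
      obtain ⟨⟨d', hd', ht⟩, hin, hnv, hval⟩ := ih _ t h
      exact ⟨⟨d', List.mem_cons_of_mem _ hd', ht⟩, hin, hnv, hval⟩

theorem pvNewD_complete (m : List (List Int)) (cur r c : Int) :
    ∀ (ds vis : List (Int × Int)) (t : Int × Int), pvInR t → t ∉ vis →
      pvVal m t.1 t.2 = cur → (∃ d ∈ ds, t = (r + d.1, d.2 + c)) →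
      t ∈ pvNewD m cur r c vis ds := by
  intro ds
  induction ds with
  | nil => rintro vis t _ _ _ ⟨d, hd, _⟩; simp at hd
  | cons d ds ih =>
    rintro vis t hin hnv hval ⟨d', hd', ht⟩
    by_cases ht0 : t = (r + d.1, d.2 + c)
    · subst ht0
      have hc : 0 ≤ r + d.1 ∧ r + d.1 < 5 ∧ 0 ≤ d.2 + c ∧ d.2 + c < 5 ∧
          ¬(r + d.1, d.2 + c) ∈ vis ∧ pvVal m (r + d.1) (d.2 + c) = cur :=
        ⟨hin.1, hin.2.1, hin.2.2.1, hin.2.2.2, hnv, hval⟩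
      simp only [pvNewD, if_pos hc]
      exact List.mem_cons_self ..
    · have hd'' : d' ∈ ds := by
        rcases List.mem_cons.1 hd' with rfl | h
        · exact absurd ht ht0
        · exact h
      by_cases hc : 0 ≤ r + d.1 ∧ r + d.1 < 5 ∧ 0 ≤ d.2 + c ∧ d.2 + c < 5 ∧
          ¬(r + d.1, d.2 + c) ∈ vis ∧ pvVal m (r + d.1) (d.2 + c) = cur
      · simp only [pvNewD, if_pos hc]
        refine List.mem_cons_of_mem _ (ih _ t hin ?_ hval ⟨d', hd'', ht⟩)
        intro hmem
        rcases List.mem_append.1 hmem with h | h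
        · exact hnv h
        · exact ht0 (by simpa using h)
      · simp only [pvNewD, if_neg hc]
        exact ih _ t hin hnv hval ⟨d', hd'', ht⟩

theorem pvNewD_nodup (m : List (List Int)) (cur r c : Int) :
    ∀ (ds vis : List (Int × Int)), (pvNewD m cur r c vis ds).Nodup := by
  intro ds
  induction ds with
  | nil => intro vis; simp [pvNewD]
  | cons d ds ih =>
    intro vis
    by_cases hc : 0 ≤ r + d.1 ∧ r + d.1 < 5 ∧ 0 ≤ d.2 + c ∧ d.2 + c < 5 ∧
        ¬(r + d.1, d.2 + c) ∈ vis ∧ pvVal m (r + d.1) (d.2 + c) = cur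
    · simp only [pvNewD, if_pos hc]
      refine List.nodup_cons.2 ⟨?_, ih _⟩
      intro hmem
      have := (pvNewD_sub m cur r c ds _ _ hmem).2.2.1
      exact this (List.mem_append_right _ (List.mem_singleton.2 rfl))
    · simp only [pvNewD, if_neg hc]
      exact ih _

theorem nbr_shift_iff (r c : Int) (t : Int × Int) :
    (∃ d ∈ pvDirections, t = (r + d.1, d.2 + c)) ↔ t ∈ pvNbrs (r, c) := by
  obtain ⟨a, b⟩ := t
  simp only [pvDirections, pvNbrs, List.mem_cons, List.not_mem_nil, or_false]
  constructor
  · rintro ⟨d, (rfl | rfl | rfl | rfl), h⟩ <;>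
      simp only [Prod.mk.injEq] at h ⊢ <;> omega
  · rintro (h | h | h | h)
    · refine ⟨(-1, 0), by simp, ?_⟩
      simp only [Prod.mk.injEq] at h ⊢
      omega
    · refine ⟨(1, 0), by simp, ?_⟩
      simp only [Prod.mk.injEq] at h ⊢
      omega
    · refine ⟨(0, -1), by simp, ?_⟩
      simp only [Prod.mk.injEq] at h ⊢
      omega
    · refine ⟨(0, 1), by simp, ?_⟩
      simp only [Prod.mk.injEq] at h ⊢
      omega

theorem pvNewD_mem (m : List (List Int)) (cur r c : Int) (vis : List (Int × Int)) :
    ∀ t, t ∈ pvNewD m cur r c vis pvDirections ↔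
      t ∈ pvNbrs (r, c) ∧ pvInR t ∧ t ∉ vis ∧ pvVal m t.1 t.2 = cur := by
  intro t
  constructor
  · intro h
    obtain ⟨hex, hin, hnv, hval⟩ := pvNewD_sub m cur r c pvDirections vis t h
    exact ⟨(nbr_shift_iff r c t).1 hex, hin, hnv, hval⟩
  · rintro ⟨hnbr, hin, hnv, hval⟩
    exact pvNewD_complete m cur r c pvDirections vis t hin hnv hval
      ((nbr_shift_iff r c t).2 hnbr)

-- the frontier exchange: re-blocking freshly found cells loses no reachability
theorem bfs_crux {m : List (List Int)} {cur : Int} {vis L q' : List (Int × Int)}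
    {rc : Int × Int}
    (_hq : ∀ x ∈ q', x ∈ vis) (hrc : rc ∈ vis)
    (hL : ∀ t, t ∈ L ↔ t ∈ pvNbrs rc ∧ pvInR t ∧ t ∉ vis ∧ pvVal m t.1 t.2 = cur) :
    ∀ t, (t ∈ vis ++ L ∨ ∃ x ∈ q' ++ L, Relation.ReflTransGen (pvRel m cur (vis ++ L)) x t)
       ↔ (t ∈ vis ∨ ∃ x ∈ rc :: q', Relation.ReflTransGen (pvRel m cur vis) x t) := by
  have hsub : ∀ x t, Relation.ReflTransGen (pvRel m cur (vis ++ L)) x t →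
      Relation.ReflTransGen (pvRel m cur vis) x t := by
    intro x t h
    refine Relation.ReflTransGen.mono ?_ h
    rintro a b ⟨h1, h2, h3, h4⟩
    exact ⟨h1, h2, h3, fun hv => h4 (List.mem_append_left _ hv)⟩
  have hstep : ∀ y, y ∈ L → pvRel m cur vis rc y := by
    intro y hy
    obtain ⟨h1, h2, h3, h4⟩ := (hL y).1 hy
    exact ⟨h1, h2, h4, h3⟩
  intro t
  constructor
  · rintro (h | ⟨x, hx, hxt⟩)
    · rcases List.mem_append.1 h with h | h
      · exact Or.inl h
      · exact Or.inr ⟨rc, List.mem_cons_self ..,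
          Relation.ReflTransGen.single (hstep t h)⟩
    · rcases List.mem_append.1 hx with hx | hx
      · exact Or.inr ⟨x, List.mem_cons_of_mem _ hx, hsub _ _ hxt⟩
      · exact Or.inr ⟨rc, List.mem_cons_self ..,
          Relation.ReflTransGen.head (hstep x hx) (hsub _ _ hxt)⟩
  · rintro (h | ⟨x, hx, hxt⟩)
    · exact Or.inl (List.mem_append_left _ h)
    · have main : ∀ z t', Relation.ReflTransGen (pvRel m cur vis) z t' →
          (z = rc ∨ ∃ w ∈ q' ++ L, Relation.ReflTransGen (pvRel m cur (vis ++ L)) w z) →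
          (t' ∈ vis ++ L ∨
            ∃ w ∈ q' ++ L, Relation.ReflTransGen (pvRel m cur (vis ++ L)) w t') := by
        intro z t' hzt'
        induction hzt' using Relation.ReflTransGen.head_induction_on with
        | refl =>
          rintro (rfl | ⟨w, hw, hwz⟩)
          · exact Or.inl (List.mem_append_left _ hrc)
          · exact Or.inr ⟨w, hw, hwz⟩
        | @head z0 y h₁ h₂ ih =>
          rintro (rfl | ⟨w, hw, hwz⟩)
          · exact ih (Or.inr ⟨y, List.mem_append_right _
              ((hL y).2 ⟨h₁.1, h₁.2.1, h₁.2.2.2, h₁.2.2.1⟩), .refl⟩)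
          · by_cases hyL : y ∈ L
            · exact ih (Or.inr ⟨y, List.mem_append_right _ hyL, .refl⟩)
            · refine ih (Or.inr ⟨w, hw, hwz.tail ⟨h₁.1, h₁.2.1, h₁.2.2.1, ?_⟩⟩)
              intro hcm
              rcases List.mem_append.1 hcm with hcm | hcm
              · exact h₁.2.2.2 hcm
              · exact hyL hcm
      rcases List.mem_cons.1 hx with rfl | hx'
      · exact main x t hxt (Or.inl rfl)
      · exact main x t hxt (Or.inr ⟨x, List.mem_append_left _ hx', .refl⟩)

-- BFS loop specification
theorem pvBfs_spec (m : List (List Int)) (cur : Int) :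
    ∀ (fuel : Nat) (vis q : List (Int × Int)) (cnt : Int),
    vis.Nodup → q.Nodup → (∀ x ∈ q, x ∈ vis) → (∀ x ∈ vis, pvInR x) →
    q.length + (25 - vis.length) ≤ fuel →
    ∃ v : List (Int × Int),
      pvBfs m cur fuel vis q cnt =
        (v, cnt + (q.length : Int) + ((v.length : Int) - (vis.length : Int))) ∧
      v.Nodup ∧ (∀ x ∈ vis, x ∈ v) ∧ (∀ x ∈ v, pvInR x) ∧
      (∀ t, t ∈ v ↔ (t ∈ vis ∨ ∃ x ∈ q, Relation.ReflTransGen (pvRel m cur vis) x t)) := by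
  intro fuel
  induction fuel with
  | zero =>
    intro vis q cnt hv _ hqv hinr hfuel
    have hq0 : q = [] := by
      have := length_le_25 hv hinr
      have : q.length = 0 := by omega
      exact List.eq_nil_of_length_eq_zero this
    subst hq0
    exact ⟨vis, by simp [pvBfs], hv, fun x h => h, hinr, by simp⟩
  | succ fuel ih =>
    intro vis q cnt hv hq hqv hinr hfuel
    rcases q with _ | ⟨⟨r, c⟩, q'⟩
    · exact ⟨vis, by simp [pvBfs], hv, fun x h => h, hinr, by simp⟩
    · have hfold := foldl_pvStep m cur r c pvDirections vis q'
      set L := pvNewD m cur r c vis pvDirections with hLdef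
      have hLmem := pvNewD_mem m cur r c vis
      have hLnd : L.Nodup := pvNewD_nodup m cur r c pvDirections vis
      have hLvis : ∀ t ∈ L, t ∉ vis := fun t ht => ((hLmem t).1 ht).2.2.1
      have hLinr : ∀ t ∈ L, pvInR t := fun t ht => ((hLmem t).1 ht).2.1
      have hnd2 : (vis ++ L).Nodup := by
        rw [List.nodup_append]
        exact ⟨hv, hLnd, fun x hx b hb hxb => hLvis b hb (hxb ▸ hx)⟩
      have hinr2 : ∀ x ∈ vis ++ L, pvInR x := by
        intro x hx
        rcases List.mem_append.1 hx with hx | hx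
        · exact hinr x hx
        · exact hLinr x hx
      have hq2 : (q' ++ L).Nodup := by
        rw [List.nodup_append]
        exact ⟨(List.nodup_cons.1 hq).2, hLnd,
          fun x hx b hb hxb => hLvis b hb (hxb ▸ hqv x (List.mem_cons_of_mem _ hx))⟩
      have hqv2 : ∀ x ∈ q' ++ L, x ∈ vis ++ L := by
        intro x hx
        rcases List.mem_append.1 hx with hx | hx
        · exact List.mem_append_left _ (hqv x (List.mem_cons_of_mem _ hx))
        · exact List.mem_append_right _ hx
      have hlen2 : (vis ++ L).length ≤ 25 := length_le_25 hnd2 hinr2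
      have hfuel2 : (q' ++ L).length + (25 - (vis ++ L).length) ≤ fuel := by
        simp only [List.length_append] at *
        simp only [List.length_cons] at hfuel
        omega
      obtain ⟨v, hrun, hvnd, hmono, hvinr, hvmem⟩ :=
        ih (vis ++ L) (q' ++ L) (cnt + 1) hnd2 hq2 hqv2 hinr2 hfuel2
      refine ⟨v, ?_, hvnd, fun x hx => hmono x (List.mem_append_left _ hx), hvinr, ?_⟩
      · show pvBfs m cur (fuel + 1) vis ((r, c) :: q') cnt = _
        simp only [pvBfs]
        rw [hfold]
        simp only at hrun ⊢
        rw [hrun]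
        congr 1
        simp only [List.length_append, List.length_cons]
        push_cast
        ring
      · intro t
        rw [hvmem t]
        exact bfs_crux (fun x hx => hqv x (List.mem_cons_of_mem _ hx))
          (hqv _ (List.mem_cons_self ..)) hLmem t

-- starting a BFS on a fresh cell explores exactly its component
theorem relstar_iff_reach {m : List (List Int)} {s : Int × Int} {vis : List (Int × Int)}
    (hs : pvInR s) (hsv : s ∉ vis)
    (hclosed : ∀ u ∈ vis, ∀ t, pvReach m u t → t ∈ vis) :
    ∀ t, (t ∈ s :: vis ∨
        ∃ x ∈ ([s] : List (Int × Int)),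
          Relation.ReflTransGen (pvRel m (pvVal m s.1 s.2) (s :: vis)) x t)
       ↔ (t ∈ vis ∨ pvReach m s t) := by
  intro t
  constructor
  · rintro (h | ⟨x, hx, hxt⟩)
    · rcases List.mem_cons.1 h with rfl | h
      · exact Or.inr .refl
      · exact Or.inl h
    · have hx' : x = s := by simpa using hx
      subst hx'
      right
      clear hx
      induction hxt with
      | refl => exact .refl
      | tail hab hbc ih =>
        refine ih.tail ⟨reach_inR ih hs, hbc.2.1, hbc.1, ?_⟩
        rw [← reach_val ih]
        exact hbc.2.2.1.symm
  · rintro (h | h)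
    · exact Or.inl (List.mem_cons_of_mem _ h)
    · have key : t = s ∨ Relation.ReflTransGen (pvRel m (pvVal m s.1 s.2) (s :: vis)) s t := by
        induction h with
        | refl => exact Or.inl rfl
        | @tail b u hab hbc ih =>
          right
          have hreach : pvReach m s u := hab.tail hbc
          have hnv : u ∉ vis := by
            intro hu
            exact hsv (hclosed u hu s (reach_symm hreach))
          by_cases hus : u = s
          · subst hus; exact .refl
          · have hstep : pvRel m (pvVal m s.1 s.2) (s :: vis) b u := by
              refine ⟨hbc.2.2.1, hbc.2.1, (reach_val hreach).symm, ?_⟩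
              intro hc
              rcases List.mem_cons.1 hc with rfl | hc
              · exact hus rfl
              · exact hnv hc
            rcases ih with rfl | ih
            · exact Relation.ReflTransGen.single hstep
            · exact ih.tail hstep
      rcases key with rfl | key
      · exact Or.inl (List.mem_cons_self ..)
      · exact Or.inr ⟨s, List.mem_singleton.2 rfl, key⟩

-- outer loop: one processing step preserves the invariant
theorem pvG_inv {m : List (List Int)} {P : List (Int × Int)} {st : List (Int × Int) × Int}
    {p : Int × Int} (hp : pvInR p) (h : pvInv m P st) : pvInv m (P ++ [p]) (pvG m st p) := by
  obtain ⟨vis, res⟩ := st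
  obtain ⟨hnd, hinr, hmem, hres⟩ := h
  simp only [pvInv] at *
  by_cases hpv : p ∈ vis
  · simp only [pvG, if_pos hpv]
    refine ⟨hnd, hinr, ?_, hres⟩
    intro t
    rw [hmem t]
    constructor
    · rintro ⟨q, hq, hr⟩
      exact ⟨q, List.mem_append_left _ hq, hr⟩
    · rintro ⟨q, hq, hr⟩
      rcases List.mem_append.1 hq with hq | hq
      · exact ⟨q, hq, hr⟩
      · have hqp : q = p := by simpa using hq
        obtain ⟨q0, hq0, hr0⟩ := (hmem p).1 hpv
        exact ⟨q0, hq0, hr0.trans (hqp ▸ hr)⟩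
  · have hclosed : ∀ u ∈ vis, ∀ t, pvReach m u t → t ∈ vis := by
      intro u hu t hr
      obtain ⟨q0, hq0, hr0⟩ := (hmem u).1 hu
      exact (hmem t).2 ⟨q0, hq0, hr0.trans hr⟩
    obtain ⟨v, hrun, hvnd, hmono, hvinr, hvmem⟩ :=
      pvBfs_spec m (pvVal m p.1 p.2) 30 (p :: vis) [p] 0
        (List.nodup_cons.2 ⟨hpv, hnd⟩) (List.nodup_singleton _)
        (by intro x hx; simp only [List.mem_singleton] at hx; subst hx; exact List.mem_cons_self ..)
        (by
          intro x hx
          rcases List.mem_cons.1 hx with rfl | hx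
          · exact hp
          · exact hinr x hx)
        (by
          simp only [List.length_cons, List.length_nil]
          omega)
    have hvmem' : ∀ t, t ∈ v ↔ (t ∈ vis ∨ pvReach m p t) := by
      intro t
      rw [hvmem t]
      exact relstar_iff_reach hp hpv hclosed t
    have hcomp := mem_pvComponent (m := m) hp
    have hdisj : Disjoint vis.toFinset (pvComponent m p).toFinset := by
      rw [Finset.disjoint_left]
      intro t htv htc
      have hr : pvReach m p t := (hcomp t).1 (List.mem_toFinset.1 htc)
      exact hpv (hclosed t (List.mem_toFinset.1 htv) p (reach_symm hr))
    have hvfin : v.toFinset = vis.toFinset ∪ (pvComponent m p).toFinset := by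
      ext t
      simp only [List.mem_toFinset, Finset.mem_union, hvmem', hcomp]
    have hvlen : v.length = vis.length + (pvComponent m p).length := by
      rw [← List.toFinset_card_of_nodup hvnd, ← List.toFinset_card_of_nodup hnd,
        ← List.toFinset_card_of_nodup (nodup_pvComponent m p), hvfin,
        Finset.card_union_of_disjoint hdisj]
    have hcnt : (0 : Int) + (([p] : List (Int × Int)).length : Int) +
        ((v.length : Int) - ((p :: vis).length : Int)) = ((pvComponent m p).length : Int) := by
      simp only [List.length_cons, List.length_nil, hvlen]
      push_cast
      ring
    simp only [pvG, if_neg hpv, hrun, hcnt]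
    refine ⟨hvnd, hvinr, ?_, ?_⟩
    · intro t
      rw [hvmem' t]
      constructor
      · rintro (ht | hr)
        · obtain ⟨q0, hq0, hr0⟩ := (hmem t).1 ht
          exact ⟨q0, List.mem_append_left _ hq0, hr0⟩
        · exact ⟨p, List.mem_append_right _ (List.mem_singleton.2 rfl), hr⟩
      · rintro ⟨q, hq, hr⟩
        rcases List.mem_append.1 hq with hq | hq
        · exact Or.inl ((hmem t).2 ⟨q, hq, hr⟩)
        · have hqp : q = p := by simpa using hq
          exact Or.inr (hqp ▸ hr)
    · have hcompval : ∀ t ∈ (pvComponent m p).toFinset,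
          pvF m t = if 3 ≤ (pvComponent m p).length then (1 : Int) else 0 := by
        intro t ht
        have hr := (hcomp t).1 (List.mem_toFinset.1 ht)
        unfold pvF
        rw [comp_length_eq hp hr]
      have hsum2 : ∑ t ∈ (pvComponent m p).toFinset, pvF m t =
          ((pvComponent m p).length : Int) * (if 3 ≤ (pvComponent m p).length then 1 else 0) := by
        rw [Finset.sum_congr rfl hcompval, Finset.sum_const,
          List.toFinset_card_of_nodup (nodup_pvComponent m p), nsmul_eq_mul]
      rw [hvfin, Finset.sum_union hdisj, hres, hsum2]
      by_cases h3 : 3 ≤ (pvComponent m p).length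
      · have h3' : (3 : Int) ≤ ((pvComponent m p).length : Int) := by exact_mod_cast h3
        rw [if_pos h3, if_pos h3', mul_one]
      · have h3' : ¬ (3 : Int) ≤ ((pvComponent m p).length : Int) := by exact_mod_cast h3
        rw [if_neg h3, if_neg h3', mul_zero, add_zero]

theorem pvG_run {m : List (List Int)} :
    ∀ (l P : List (Int × Int)) (st : List (Int × Int) × Int),
    (∀ p ∈ l, pvInR p) → pvInv m P st → pvInv m (P ++ l) (l.foldl (pvG m) st) := by
  intro l
  induction l with
  | nil => intro P st _ h; simpa using h
  | cons p l ih =>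
    intro P st hl h
    have h1 := pvG_inv (hl p (List.mem_cons_self ..)) h
    have h2 := ih (P ++ [p]) (pvG m st p) (fun x hx => hl x (List.mem_cons_of_mem _ hx)) h1
    simpa using h2

-- flattening the nested loops
theorem foldl_double {α β γ : Type} (f : γ → α → β → γ) (l1 : List α) (l2 : List β)
    (init : γ) :
    l1.foldl (fun st i => l2.foldl (fun st j => f st i j) st) init =
      (l1.flatMap (fun i => l2.map (fun j => (i, j)))).foldl (fun st p => f st p.1 p.2) init := by
  induction l1 generalizing init with
  | nil => rfl
  | cons a l ih => simp [List.foldl_append, List.foldl_map, ih]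

theorem check_relic_eq_foldl (m : List (List Int)) :
    check_relic m = ((pvCells.foldl (pvG m) ([], 0)).2 : Int) := by
  unfold check_relic pvCells
  rw [foldl_double (fun st i j =>
    if (i, j) ∈ st.1 then st
    else
      let r := pvBfs m (pvVal m i j) 30 ((i, j) :: st.1) [(i, j)] 0
      (r.1, st.2 + if 3 ≤ r.2 then r.2 else 0))]
  simp only [Prod.mk.eta]
  rfl

theorem check_relic_eq_sum (m : List (List Int)) :
    check_relic m = ∑ t ∈ pvCells.toFinset, pvF m t := by
  rw [check_relic_eq_foldl]
  have hinv : pvInv m ([] ++ pvCells) (pvCells.foldl (pvG m) ([], 0)) := by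
    refine pvG_run pvCells [] ([], 0) (fun p hp => mem_pvCells.1 hp) ?_
    refine ⟨List.nodup_nil, by simp, by simp, by simp⟩
  obtain ⟨hnd, hinr, hmem, hres⟩ := hinv
  have hfin : (pvCells.foldl (pvG m) ([], 0)).1.toFinset = pvCells.toFinset := by
    ext t
    simp only [List.mem_toFinset]
    rw [hmem t]
    constructor
    · rintro ⟨p, hp, hr⟩
      exact mem_pvCells.2 (reach_inR hr (mem_pvCells.1 (by simpa using hp)))
    · intro ht
      exact ⟨t, by simpa using ht, .refl⟩
  rw [hres, hfin]

-- ===== B-side proof layer: labels, index/cell coding, edge connectivity =====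
def pvIdx (x : Int) : Prop := 0 ≤ x ∧ x < 25

def pvDec (x : Int) : Int × Int := (x / 5, x % 5)

def pvEnc (p : Int × Int) : Int := 5 * p.1 + p.2

def pvS (E : List (Int × Int)) (u v : Int) : Prop := (u, v) ∈ E ∨ (v, u) ∈ E

def pvConn (E : List (Int × Int)) : Int → Int → Prop := Relation.ReflTransGen (pvS E)

def pvLget (labels : List Int) (x : Int) : Int := PySem.List.pyGetD labels x 0

def pvLInv (E : List (Int × Int)) (labels : List Int) : Prop :=
  labels.length = 25 ∧
  ∀ x y : Int, pvIdx x → pvIdx y → (pvLget labels x = pvLget labels y ↔ pvConn E x y)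

theorem conn_symm {E : List (Int × Int)} {x y : Int} (h : pvConn E x y) : pvConn E y x := by
  induction h with
  | refl => exact .refl
  | tail _ hbc ih => exact Relation.ReflTransGen.head (Or.symm (Or.symm hbc).symm) ih

theorem conn_mono {E E2 : List (Int × Int)} {x y : Int} (h : pvConn E x y) :
    pvConn (E ++ E2) x y := by
  refine Relation.ReflTransGen.mono ?_ h
  rintro a b (h | h)
  · exact Or.inl (List.mem_append_left _ h)
  · exact Or.inr (List.mem_append_left _ h)

theorem conn_nil {x y : Int} : pvConn [] x y ↔ x = y := by
  constructor
  · intro h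
    induction h with
    | refl => rfl
    | tail _ hbc ih => rcases hbc with h | h <;> simp at h
  · rintro rfl; exact .refl

theorem conn_append_single (E : List (Int × Int)) (a b x y : Int) :
    pvConn (E ++ [(a, b)]) x y ↔
      pvConn E x y ∨ (pvConn E x a ∧ pvConn E b y) ∨ (pvConn E x b ∧ pvConn E a y) := by
  constructor
  · intro h
    induction h with
    | refl => exact Or.inl .refl
    | @tail c t hxc hct ih =>
      have hstep : pvS E c t ∨ (c = a ∧ t = b) ∨ (c = b ∧ t = a) := by
        rcases hct with h | h <;> rcases List.mem_append.1 h with h | h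
        · exact Or.inl (Or.inl h)
        · simp only [List.mem_singleton, Prod.mk.injEq] at h
          exact Or.inr (Or.inl ⟨h.1, h.2⟩)
        · exact Or.inl (Or.inr h)
        · simp only [List.mem_singleton, Prod.mk.injEq] at h
          exact Or.inr (Or.inr ⟨h.2, h.1⟩)
      rcases ih with ih | ⟨h1, h2⟩ | ⟨h1, h2⟩
      · rcases hstep with h | ⟨rfl, rfl⟩ | ⟨rfl, rfl⟩
        · exact Or.inl (ih.tail h)
        · exact Or.inr (Or.inl ⟨ih, .refl⟩)
        · exact Or.inr (Or.inr ⟨ih, .refl⟩)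
      · rcases hstep with h | ⟨rfl, rfl⟩ | ⟨rfl, rfl⟩
        · exact Or.inr (Or.inl ⟨h1, h2.tail h⟩)
        · exact Or.inr (Or.inl ⟨h1, .refl⟩)
        · exact Or.inl h1
      · rcases hstep with h | ⟨rfl, rfl⟩ | ⟨rfl, rfl⟩
        · exact Or.inr (Or.inr ⟨h1, h2.tail h⟩)
        · exact Or.inl h1
        · exact Or.inr (Or.inr ⟨h1, .refl⟩)
  · have hstep : pvConn (E ++ [(a, b)]) a b :=
      Relation.ReflTransGen.single (Or.inl (List.mem_append_right _ (List.mem_singleton.2 rfl)))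
    rintro (h | ⟨h1, h2⟩ | ⟨h1, h2⟩)
    · exact conn_mono h
    · exact ((conn_mono h1).trans hstep).trans (conn_mono h2)
    · exact ((conn_mono h1).trans (conn_symm hstep)).trans (conn_mono h2)

theorem mem_pvEdges {m : List (List Int)} {e : Int × Int} : e ∈ pvEdges m ↔
    (∃ i j : Int, (0 ≤ i ∧ i < 5) ∧ (0 ≤ j ∧ j < 4) ∧ pvVal m i j = pvVal m i (j + 1) ∧
      e = (5 * i + j, 5 * i + j + 1)) ∨
    (∃ i j : Int, (0 ≤ i ∧ i < 4) ∧ (0 ≤ j ∧ j < 5) ∧ pvVal m i j = pvVal m (i + 1) j ∧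
      e = (5 * i + j, 5 * i + j + 5)) := by
  simp only [pvEdges, List.mem_append, List.mem_flatMap, List.mem_map, List.mem_filter,
    PySem.List.mem_pyRange_one, beq_iff_eq]
  constructor
  · rintro (⟨i, hi, j, ⟨hj, hv⟩, he⟩ | ⟨i, hi, j, ⟨hj, hv⟩, he⟩)
    · exact Or.inl ⟨i, j, hi, hj, hv, he.symm⟩
    · exact Or.inr ⟨i, j, hi, hj, hv, he.symm⟩
  · rintro (⟨i, j, hi, hj, hv, he⟩ | ⟨i, j, hi, hj, hv, he⟩)
    · exact Or.inl ⟨i, hi, j, ⟨hj, hv⟩, he.symm⟩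
    · exact Or.inr ⟨i, hi, j, ⟨hj, hv⟩, he.symm⟩

theorem edges_idx (m : List (List Int)) : ∀ e ∈ pvEdges m, pvIdx e.1 ∧ pvIdx e.2 := by
  intro e he
  rcases mem_pvEdges.1 he with ⟨i, j, hi, hj, _, rfl⟩ | ⟨i, j, hi, hj, _, rfl⟩ <;>
    constructor <;> constructor <;> simp only [pvIdx] <;> omega

theorem pvDec_mk {i j : Int} (_hi : 0 ≤ i) (hj : 0 ≤ j) (hj5 : j < 5) :
    pvDec (5 * i + j) = (i, j) := by
  unfold pvDec
  have h1 : (5 * i + j) / 5 = i := by omega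
  have h2 : (5 * i + j) % 5 = j := by omega
  rw [h1, h2]

theorem pvEnc_pvDec {x : Int} (hx : pvIdx x) : pvEnc (pvDec x) = x := by
  obtain ⟨h1, h2⟩ := hx
  unfold pvEnc pvDec
  simp only
  omega

theorem pvDec_pvEnc {p : Int × Int} (hp : pvInR p) : pvDec (pvEnc p) = p := by
  obtain ⟨a, b⟩ := p
  obtain ⟨h1, h2, h3, h4⟩ := hp
  exact pvDec_mk h1 h3 h4

theorem pvIdx_pvEnc {p : Int × Int} (hp : pvInR p) : pvIdx (pvEnc p) := by
  obtain ⟨h1, h2, h3, h4⟩ := hp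
  unfold pvIdx pvEnc
  omega

theorem pvInR_pvDec {x : Int} (hx : pvIdx x) : pvInR (pvDec x) := by
  obtain ⟨h1, h2⟩ := hx
  unfold pvInR pvDec
  constructor
  · omega
  constructor
  · omega
  constructor
  · omega
  · omega

theorem edge_adj {m : List (List Int)} {e : Int × Int} (he : e ∈ pvEdges m) :
    pvAdj m (pvDec e.1) (pvDec e.2) := by
  rcases mem_pvEdges.1 he with ⟨i, j, hi, hj, hv, rfl⟩ | ⟨i, j, hi, hj, hv, rfl⟩
  · have h1 : pvDec (5 * i + j) = (i, j) := pvDec_mk (by omega) (by omega) (by omega)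
    have h2 : pvDec (5 * i + j + 1) = (i, j + 1) := by
      have : 5 * i + j + 1 = 5 * i + (j + 1) := by ring
      rw [this]; exact pvDec_mk (by omega) (by omega) (by omega)
    simp only [h1, h2]
    refine ⟨⟨by omega, by omega, by omega, by omega⟩, ⟨by omega, by omega, by omega, by omega⟩,
      ?_, hv⟩
    simp [pvNbrs]
  · have h1 : pvDec (5 * i + j) = (i, j) := pvDec_mk (by omega) (by omega) (by omega)
    have h2 : pvDec (5 * i + j + 5) = (i + 1, j) := by
      have : 5 * i + j + 5 = 5 * (i + 1) + j := by ring
      rw [this]; exact pvDec_mk (by omega) (by omega) (by omega)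
    simp only [h1, h2]
    refine ⟨⟨by omega, by omega, by omega, by omega⟩, ⟨by omega, by omega, by omega, by omega⟩,
      ?_, hv⟩
    simp [pvNbrs]

theorem adj_edge_core (m : List (List Int)) (a b c d : Int)
    (h : pvAdj m (a, b) (c, d)) : pvS (pvEdges m) (5 * a + b) (5 * c + d) := by
  obtain ⟨hp, hq, hnb, hv⟩ := h
  have hv' : pvVal m a b = pvVal m c d := hv
  have ha0 : 0 ≤ a := hp.1
  have ha5 : a < 5 := hp.2.1
  have hb0 : 0 ≤ b := hp.2.2.1
  have hb5 : b < 5 := hp.2.2.2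
  have hc0 : 0 ≤ c := hq.1
  have hc5 : c < 5 := hq.2.1
  have hd0 : 0 ≤ d := hq.2.2.1
  have hd5 : d < 5 := hq.2.2.2
  have hnb' : (c, d) ∈ [(a - 1, b), (a + 1, b), (a, b - 1), (a, b + 1)] := hnb
  simp only [List.mem_cons, Prod.mk.injEq, List.not_mem_nil, or_false] at hnb'
  rcases hnb' with ⟨h1, h2⟩ | ⟨h1, h2⟩ | ⟨h1, h2⟩ | ⟨h1, h2⟩
  · -- q = (a - 1, b): up neighbour, covered by a down-edge from q to p
    refine Or.inr (mem_pvEdges.2 (Or.inr ⟨a - 1, b, ⟨by omega, by omega⟩, ⟨by omega, by omega⟩,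
      ?_, ?_⟩))
    · rw [show a - 1 + 1 = a by ring]
      rw [h1, h2] at hv'
      exact hv'.symm
    · simp only [Prod.mk.injEq, true_and]
      omega
  · -- q = (a + 1, b): down-edge from p to q
    refine Or.inl (mem_pvEdges.2 (Or.inr ⟨a, b, ⟨by omega, by omega⟩, ⟨by omega, by omega⟩,
      ?_, ?_⟩))
    · rw [h1, h2] at hv'
      exact hv'
    · simp only [Prod.mk.injEq, true_and]
      omega
  · -- q = (a, b - 1): left neighbour, covered by a right-edge from q to p
    refine Or.inr (mem_pvEdges.2 (Or.inl ⟨a, b - 1, ⟨by omega, by omega⟩, ⟨by omega, by omega⟩,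
      ?_, ?_⟩))
    · rw [show b - 1 + 1 = b by ring]
      rw [h1, h2] at hv'
      exact hv'.symm
    · simp only [Prod.mk.injEq, true_and]
      omega
  · -- q = (a, b + 1): right-edge from p to q
    refine Or.inl (mem_pvEdges.2 (Or.inl ⟨a, b, ⟨by omega, by omega⟩, ⟨by omega, by omega⟩,
      ?_, ?_⟩))
    · rw [h1, h2] at hv'
      exact hv'
    · simp only [Prod.mk.injEq, true_and]
      omega

theorem adj_edge {m : List (List Int)} {p q : Int × Int} (h : pvAdj m p q) :
    pvS (pvEdges m) (pvEnc p) (pvEnc q) := by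
  obtain ⟨a, b⟩ := p
  obtain ⟨c, d⟩ := q
  exact adj_edge_core m a b c d h

theorem conn_iff_reach {m : List (List Int)} {x y : Int} (hx : pvIdx x) (hy : pvIdx y) :
    pvConn (pvEdges m) x y ↔ pvReach m (pvDec x) (pvDec y) := by
  constructor
  · intro h
    clear hx hy
    induction h with
    | refl => exact .refl
    | @tail c t hxc hct ih =>
      rcases hct with h | h
      · exact ih.tail (edge_adj h)
      · exact ih.tail (pvAdj_symm (edge_adj h))
  · intro h
    have aux : ∀ s t : Int × Int, pvReach m s t → pvConn (pvEdges m) (pvEnc s) (pvEnc t) := by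
      intro s t h
      induction h with
      | refl => exact .refl
      | tail _ hbc ih => exact ih.tail (adj_edge hbc)
    have := aux _ _ h
    rwa [pvEnc_pvDec hx, pvEnc_pvDec hy] at this

theorem lget_init {x : Int} (hx : pvIdx x) : pvLget (PySem.List.pyRange 0 25 1) x = x := by
  have h := PySem.List.pyGetD_map_pyRange_of_nonneg (fun y => y) 25 x 0 hx.1 hx.2
  simpa [pvLget] using h

theorem init_inv : pvLInv [] (PySem.List.pyRange 0 25 1) := by
  refine ⟨by decide, ?_⟩
  intro x y hx hy
  rw [lget_init hx, lget_init hy, conn_nil]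

theorem lget_map {labels : List Int} {f : Int → Int} {x : Int}
    (hlen : labels.length = 25) (hx : pvIdx x) :
    pvLget (labels.map f) x = f (pvLget labels x) := by
  unfold pvLget
  rw [PySem.List.pyGetD_eq_getElem (labels.map f) 0 hx.1 (by simp [hlen]; exact hx.2),
    PySem.List.pyGetD_eq_getElem labels 0 hx.1 (by simp [hlen]; exact hx.2)]
  simp

theorem lab_alg (la lb Lx Ly : Int) :
    ((if Lx = la then lb else Lx) = (if Ly = la then lb else Ly)) ↔
      (Lx = Ly ∨ ((Lx = la ∨ Lx = lb) ∧ (Ly = la ∨ Ly = lb))) := by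
  split_ifs <;> omega

theorem conn_quad {E : List (Int × Int)} {x y a b : Int} :
    (pvConn E x y ∨ ((pvConn E x a ∨ pvConn E x b) ∧ (pvConn E y a ∨ pvConn E y b))) ↔
      (pvConn E x y ∨ (pvConn E x a ∧ pvConn E b y) ∨ (pvConn E x b ∧ pvConn E a y)) := by
  constructor
  · rintro (h | ⟨hx | hx, hy | hy⟩)
    · exact Or.inl h
    · exact Or.inl (hx.trans (conn_symm hy))
    · exact Or.inr (Or.inl ⟨hx, conn_symm hy⟩)
    · exact Or.inr (Or.inr ⟨hx, conn_symm hy⟩)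
    · exact Or.inl (hx.trans (conn_symm hy))
  · rintro (h | ⟨h1, h2⟩ | ⟨h1, h2⟩)
    · exact Or.inl h
    · exact Or.inr ⟨Or.inl h1, Or.inr (conn_symm h2)⟩
    · exact Or.inr ⟨Or.inr h1, Or.inl (conn_symm h2)⟩

theorem merge_inv {E : List (Int × Int)} {labels : List Int} {e : Int × Int}
    (h : pvLInv E labels) (he1 : pvIdx e.1) (he2 : pvIdx e.2) :
    pvLInv (E ++ [e]) (pvMerge labels e) := by
  obtain ⟨hlen, hiff⟩ := h
  obtain ⟨a, b⟩ := e
  set la := PySem.List.pyGetD labels a 0 with hla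
  set lb := PySem.List.pyGetD labels b 0 with hlb
  have hlaget : la = pvLget labels a := rfl
  have hlbget : lb = pvLget labels b := rfl
  by_cases hab : la = lb
  · have hmerge : pvMerge labels (a, b) = labels := by
      simp only [pvMerge, ← hla, ← hlb]
      rw [if_neg (by simpa using hab)]
    rw [hmerge]
    refine ⟨hlen, ?_⟩
    intro x y hx hy
    have hconnab : pvConn E a b := by
      rw [← hiff a b he1 he2, ← hlaget, ← hlbget]
      exact hab
    rw [hiff x y hx hy, conn_append_single]
    constructor
    · exact Or.inl
    · rintro (h | ⟨h1, h2⟩ | ⟨h1, h2⟩)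
      · exact h
      · exact (h1.trans hconnab).trans h2
      · exact (h1.trans (conn_symm hconnab)).trans h2
  · have hmerge : pvMerge labels (a, b) = labels.map (fun l => if l = la then lb else l) := by
      simp only [pvMerge, ← hla, ← hlb]
      rw [if_pos (by simpa using hab)]
    rw [hmerge]
    refine ⟨by simp [hlen], ?_⟩
    intro x y hx hy
    rw [lget_map hlen hx, lget_map hlen hy, lab_alg, conn_append_single]
    rw [hiff x y hx hy, hlaget, hlbget, hiff x a hx he1, hiff x b hx he2,
      hiff y a hy he1, hiff y b hy he2]
    exact conn_quad

theorem fold_inv :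
    ∀ (E2 E1 : List (Int × Int)) (labels : List Int),
    (∀ e ∈ E2, pvIdx e.1 ∧ pvIdx e.2) → pvLInv E1 labels →
    pvLInv (E1 ++ E2) (E2.foldl pvMerge labels) := by
  intro E2
  induction E2 with
  | nil => intro E1 labels _ h; simpa using h
  | cons e E2 ih =>
    intro E1 labels hidx h
    have h1 := merge_inv h (hidx e (List.mem_cons_self ..)).1 (hidx e (List.mem_cons_self ..)).2
    have h2 := ih (E1 ++ [e]) (pvMerge labels e)
      (fun x hx => hidx x (List.mem_cons_of_mem _ hx)) h1
    simpa using h2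

-- counting: the multiplicity of a final label is the size of its component
theorem list_eq_map_range {l : List Int} (h : l.length = 25) :
    l = (List.range 25).map (fun (k : Nat) => PySem.List.pyGetD l (k : Int) 0) := by
  refine List.ext_getElem (by simp [h]) ?_
  intro i h1 h2
  simp only [List.getElem_map, List.getElem_range, PySem.List.pyGetD_natCast]
  rw [List.getD_eq_getElem l 0 (by omega)]

theorem sum_filter_ge3 (l : List Int) :
    (l.filter (fun n => decide (3 ≤ n))).sum = (l.map (fun n => if 3 ≤ n then n else 0)).sum := by
  induction l with
  | nil => rfl
  | cons x l ih =>
    by_cases h : (3 : Int) ≤ x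
    · simp [h, ih]
    · simp [h, ih]

theorem pvCells_eq_map : pvCells = (List.range 25).map (fun (k : Nat) => pvDec (k : Int)) := by
  decide

theorem check_relic_alt_eq_sum (m : List (List Int)) :
    check_relic_alt m = ∑ t ∈ pvCells.toFinset, pvF m t := by
  have hInv : pvLInv (pvEdges m) ((pvEdges m).foldl pvMerge (PySem.List.pyRange 0 25 1)) := by
    have := fold_inv (pvEdges m) [] (PySem.List.pyRange 0 25 1) (edges_idx m) init_inv
    simpa using this
  show (((PySem.Dict.counter ((pvEdges m).foldl pvMerge (PySem.List.pyRange 0 25 1))).values).filter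
      (fun n => decide (3 ≤ n))).sum = _
  set Lab := (pvEdges m).foldl pvMerge (PySem.List.pyRange 0 25 1) with hLab
  clear_value Lab
  obtain ⟨hlen, hiff⟩ := hInv
  have hmap : Lab = (List.range 25).map (fun (k : Nat) => pvLget Lab (k : Int)) :=
    list_eq_map_range hlen
  -- multiplicity of any label value, as a count over the 25 indices
  have hg : ∀ v : Int, Lab.count v =
      ((List.range 25).filter (fun (k : Nat) => pvLget Lab (k : Int) == v)).length := by
    intro v
    conv_lhs => rw [hmap]
    simp only [List.count, Function.comp_def, List.countP_eq_length_filter,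
      List.filter_map, List.length_map]
  -- multiplicity of the label at index x = size of the component of cell x
  have hcount : ∀ x : Int, pvIdx x →
      Lab.count (pvLget Lab x) = (pvComponent m (pvDec x)).length := by
    intro x hx
    have hsx : pvInR (pvDec x) := pvInR_pvDec hx
    rw [hg (pvLget Lab x),
      ← List.toFinset_card_of_nodup ((List.nodup_range).filter _),
      ← List.toFinset_card_of_nodup (nodup_pvComponent m (pvDec x))]
    refine Finset.card_bij (fun k _ => pvDec (k : Int)) ?_ ?_ ?_
    · intro k hk
      simp only [List.mem_toFinset, List.mem_filter, List.mem_range, beq_iff_eq] at hk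
      obtain ⟨hk25, hkeq⟩ := hk
      have hik : pvIdx (k : Int) := ⟨by omega, by exact_mod_cast hk25⟩
      rw [List.mem_toFinset, mem_pvComponent hsx]
      have : pvConn (pvEdges m) x (k : Int) := by
        rw [← hiff x (k : Int) hx hik]
        exact hkeq.symm
      exact (conn_iff_reach hx hik).1 this
    · intro k1 hk1 k2 hk2 heq
      replace heq : pvDec (k1 : Int) = pvDec (k2 : Int) := heq
      simp only [List.mem_toFinset, List.mem_filter, List.mem_range] at hk1 hk2
      have e1 : pvEnc (pvDec (k1 : Int)) = (k1 : Int) :=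
        pvEnc_pvDec ⟨by omega, by exact_mod_cast hk1.1⟩
      have e2 : pvEnc (pvDec (k2 : Int)) = (k2 : Int) :=
        pvEnc_pvDec ⟨by omega, by exact_mod_cast hk2.1⟩
      have : (k1 : Int) = (k2 : Int) := by rw [← e1, ← e2, heq]
      exact_mod_cast this
    · intro t ht
      rw [List.mem_toFinset, mem_pvComponent hsx] at ht
      have htin : pvInR t := reach_inR ht hsx
      have hidx : pvIdx (pvEnc t) := pvIdx_pvEnc htin
      have hcast : ((pvEnc t).toNat : Int) = pvEnc t := Int.toNat_of_nonneg hidx.1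
      refine ⟨(pvEnc t).toNat, ?_, ?_⟩
      · simp only [List.mem_toFinset, List.mem_filter, List.mem_range, beq_iff_eq]
        constructor
        · have hi1 := hidx.1
          have hi2 := hidx.2
          omega
        · rw [hcast]
          have : pvConn (pvEdges m) x (pvEnc t) := by
            apply (conn_iff_reach hx hidx).2
            rwa [pvDec_pvEnc htin]
          rw [← hiff x (pvEnc t) hx hidx] at this
          exact this.symm
      · show pvDec (((pvEnc t).toNat : Nat) : Int) = t
        rw [hcast, pvDec_pvEnc htin]
  -- now compute the sum
  have hvals : (PySem.Dict.counter Lab).values =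
      (PySem.Set.ofList Lab).map (fun k => (Lab.count k : Int)) := by
    rw [show (PySem.Dict.counter Lab).values = (PySem.Dict.counter Lab).items.map Prod.snd
        from rfl, PySem.Dict.items_counter, List.map_map]
    rfl
  rw [hvals, sum_filter_ge3, List.map_map]
  have hof : ((PySem.Set.ofList Lab).map
      ((fun n => if 3 ≤ n then n else 0) ∘ fun k => (Lab.count k : Int))).sum =
      ∑ a ∈ Lab.toFinset, (if 3 ≤ (Lab.count a : Int) then (Lab.count a : Int) else 0) := by
    have hnd : (PySem.Set.ofList Lab).Nodup := PySem.Set.nodup_ofList Lab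
    rw [← List.sum_toFinset _ hnd]
    refine Finset.sum_congr ?_ (fun a _ => rfl)
    ext a
    simp [PySem.Set.mem_ofList]
  rw [hof]
  -- abstract the weight function so only the outer copy of Lab is rewritten
  set F1 : Int → Int := fun a => if 3 ≤ (Lab.count a : Int) then (1 : Int) else 0 with hF1
  have hsmul : ∑ a ∈ Lab.toFinset, (if 3 ≤ (Lab.count a : Int) then (Lab.count a : Int) else 0) =
      (Lab.map F1).sum := by
    rw [Finset.sum_list_map_count]
    refine Finset.sum_congr rfl ?_
    intro a _
    rw [hF1]
    by_cases h : (3 : Int) ≤ (Lab.count a : Int)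
    · simp [h]
    · simp [h]
  rw [hsmul]
  have hFval : ∀ k : Nat, k < 25 → F1 (pvLget Lab (k : Int)) = pvF m (pvDec (k : Int)) := by
    intro k hk
    have hik : pvIdx (k : Int) := ⟨by omega, by exact_mod_cast hk⟩
    have hFk : F1 (pvLget Lab (k : Int)) =
        if 3 ≤ ((Lab.count (pvLget Lab (k : Int))) : Int) then (1 : Int) else 0 := by
      rw [hF1]
    rw [hFk, hcount (k : Int) hik]
    unfold pvF
    by_cases h : 3 ≤ (pvComponent m (pvDec (k : Int))).length
    · rw [if_pos h, if_pos (by exact_mod_cast h)]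
    · rw [if_neg h, if_neg (by exact_mod_cast h)]
  have hmm : (Lab.map F1).sum = (pvCells.map (pvF m)).sum := by
    conv_lhs => rw [hmap]
    rw [pvCells_eq_map, List.map_map, List.map_map]
    refine congrArg List.sum (List.map_congr_left ?_)
    intro k hk
    simp only [Function.comp_apply]
    exact hFval k (List.mem_range.1 hk)
  rw [hmm]
  exact (List.sum_toFinset _ nodup_pvCells).symm

-- ===== VERDICT (by name: the statement is the Claim_ definition above) =====
theorem check_relic_spec : Claim_equal_check_relic := by
  intro m _ _
  unfold Spec_check_relic
  rw [check_relic_eq_sum, check_relic_alt_eq_sum]
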